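-- pv_equiv track=rewrite | github.com/Advestis/enAInem | enainem.py | _is_view_indexes
-- ===== SOURCE A (Python) =====
-- def _is_view_indexes(view_widths):
--     indexes = []
--     start_index = 0
--
--     for width in view_widths:
--         end_index = start_index + width
--         indexes.append((start_index, end_index))
--         start_index = end_index
--
--     return indexes
-- ===== SOURCE B (Python) =====
-- def _is_view_indexes(view_widths):
--     # Precompute the boundary table [0, w0, w0+w1, ...], then pair adjacent boundaries.
--     bounds = [0]
--     for width in view_widths:
--         bounds.append(bounds[-1] + width)
--     return list(zip(bounds, bounds[1:]))
-- ===== Notes on version B (the rewrite author's own statement) =====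
-- stated objective: alternative
-- what changed: B precomputes the cumulative-boundary table (prefix sums with a leading 0) and then forms the result by zipping adjacent boundaries, instead of A's single fused loop that maintains a running start index and appends pairs as it goes.
import Mathlib
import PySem

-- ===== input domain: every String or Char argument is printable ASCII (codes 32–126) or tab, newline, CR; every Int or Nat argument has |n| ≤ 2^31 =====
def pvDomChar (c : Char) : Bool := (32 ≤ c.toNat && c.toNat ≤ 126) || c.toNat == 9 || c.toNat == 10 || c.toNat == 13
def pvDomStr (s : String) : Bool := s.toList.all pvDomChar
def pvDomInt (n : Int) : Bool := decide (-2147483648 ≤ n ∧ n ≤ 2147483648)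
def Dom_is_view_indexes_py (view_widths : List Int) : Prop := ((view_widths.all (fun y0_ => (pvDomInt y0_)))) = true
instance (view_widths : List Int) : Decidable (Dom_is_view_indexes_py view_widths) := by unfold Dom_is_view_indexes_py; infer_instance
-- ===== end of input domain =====

-- B replaces A's fused running-start loop with a precomputed boundary table (prefix sums) zipped with its own tail; alternative decomposition, same cost.


-- ===== PORT A =====
-- A: one fused loop carrying (start_index, indexes); appends (start, start+width) each step.
def is_view_indexes_py (view_widths : List Int) : List (Int × Int) :=
  (view_widths.foldl
    (fun (st : Int × List (Int × Int)) width =>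
      let end_index := st.1 + width
      (end_index, st.2 ++ [(st.1, end_index)]))
    (0, [])).2

-- ===== PORT B =====
-- B: build the boundary table bounds = [0, w0, w0+w1, …] (appending bounds[-1] + width),
-- then zip bounds with bounds[1:].  bounds is always nonempty, so bounds[-1] = getLast!.
def is_view_indexes_py_alt (view_widths : List Int) : List (Int × Int) :=
  let bounds := view_widths.foldl (fun (bs : List Int) width => bs ++ [bs.getLast! + width]) [0]
  bounds.zip bounds.tail

-- ===== PRECONDITION & SPEC =====
def Spec_is_view_indexes_py (view_widths : List Int) (out : List (Int × Int)) : Prop := out = is_view_indexes_py_alt view_widths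
instance (view_widths : List Int) (out : List (Int × Int)) : Decidable (Spec_is_view_indexes_py view_widths out) := by unfold Spec_is_view_indexes_py; infer_instance

-- ===== CLAIM (what is proved, stated in full; the proofs are below) =====
def Claim_equal_is_view_indexes_py : Prop := ∀ (view_widths : List Int), Dom_is_view_indexes_py view_widths → Spec_is_view_indexes_py view_widths (is_view_indexes_py view_widths)

-- ===== LEMMAS AND PROOFS =====

-- reference "pair stream" starting at s
def pvPairs (s : Int) : List Int → List (Int × Int)
  | [] => []
  | w :: t => (s, s + w) :: pvPairs (s + w) t

-- reference "boundary stream" after s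
def pvBounds (s : Int) : List Int → List Int
  | [] => []
  | w :: t => (s + w) :: pvBounds (s + w) t

lemma foldlA_eq (vw : List Int) : ∀ (s : Int) (acc : List (Int × Int)),
    (vw.foldl (fun (st : Int × List (Int × Int)) width =>
      let end_index := st.1 + width
      (end_index, st.2 ++ [(st.1, end_index)])) (s, acc)).2 = acc ++ pvPairs s vw := by
  induction vw with
  | nil => intro s acc; simp [pvPairs]
  | cons w t ih =>
    intro s acc
    simp only [List.foldl, pvPairs]
    rw [ih]
    simp

lemma foldlB_eq (vw : List Int) : ∀ (s : Int) (bs : List Int),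
    vw.foldl (fun (bs : List Int) width => bs ++ [bs.getLast! + width]) (bs ++ [s])
      = bs ++ [s] ++ pvBounds s vw := by
  induction vw with
  | nil => intro s bs; simp [pvBounds]
  | cons w t ih =>
    intro s bs
    simp only [List.foldl, pvBounds]
    have h1 : (bs ++ [s]).getLast! = s := by
      induction bs <;> simp [List.getLast!]
    rw [h1]
    have := ih (s + w) (bs ++ [s])
    simpa using this

lemma zip_pairs (vw : List Int) : ∀ (s : Int),
    (s :: pvBounds s vw).zip (pvBounds s vw) = pvPairs s vw := by
  induction vw with
  | nil => intro s; simp [pvBounds, pvPairs]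
  | cons w t ih =>
    intro s
    simp only [pvBounds, pvPairs, List.zip_cons_cons]
    rw [ih]

-- ===== VERDICT (by name: the statement is the Claim_ definition above) =====
theorem is_view_indexes_py_spec : Claim_equal_is_view_indexes_py := by
  intro vw _
  unfold Spec_is_view_indexes_py is_view_indexes_py is_view_indexes_py_alt
  have hB := foldlB_eq vw 0 []
  simp only [List.nil_append] at hB
  rw [foldlA_eq vw 0 [], hB]
  exact (zip_pairs vw 0).symm
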